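-- pv_equiv track=rewrite | github.com/bsztankovacs/advent-of-code-2024 | day-4/main.py | is_x_shaped_mas_on_coords
-- ===== SOURCE A (Python) =====
-- from typing import List, Tuple
--
-- def is_out_of_bounds(map: List[str], coords: Tuple[int, int]) -> bool:
--     return coords[0] >= len(map) or coords[1] >= len(map[0]) or coords[0] < 0 or coords[1] < 0
--
-- def is_x_shaped_mas_on_coords(map: List[str], initial_coords: Tuple[int, int]) -> bool:
--     # check if the current position and neighbouring fields in an X pattern are out of bounds
--     lower_right_coords = (initial_coords[0] + 1, initial_coords[1] + 1)
--     lower_left_coords = (initial_coords[0] + 1, initial_coords[1] - 1)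
--     upper_left_coords = (initial_coords[0] - 1, initial_coords[1] - 1)
--     upper_right_coords = (initial_coords[0] - 1, initial_coords[1] + 1)
--
--     x_coords = [lower_right_coords, lower_left_coords, upper_left_coords, upper_right_coords]
--
--     if is_out_of_bounds(map, initial_coords) or any([is_out_of_bounds(map, coords) for coords in x_coords]):
--         return False
--
--     if map[initial_coords[0]][initial_coords[1]] != "A":
--         # if the current letter is not the central "A" of the MAS, return 0
--         return False
--
--     # if the letters across from each other match, it can't be a X-MAS
--     if map[lower_right_coords[0]][lower_right_coords[1]] == map[upper_left_coords[0]][upper_left_coords[1]]: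
--         return False
--
--     # if otherwise, if there are 2-2 M and S letters in the corners, it is a X-MAS
--     letters = [map[x][y] for x, y in x_coords]
--
--     return letters.count("M") == 2 and letters.count("S") == 2
-- ===== SOURCE B (Python) =====
-- def is_x_shaped_mas_on_coords(map, initial_coords):
--     r, c = initial_coords
--     rows = len(map)
--     cols = len(map[0]) if map else 0
--     if not (1 <= r <= rows - 2 and 1 <= c <= cols - 2):
--         return False
--     # read the centre then the corners clockwise from the upper-left,
--     # and match against the four rotations of the valid corner word "MMSS"
--     ring = map[r][c] + map[r-1][c-1] + map[r-1][c+1] + map[r+1][c+1] + map[r+1][c-1]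
--     return any(ring == "A" + "MMSS"[i:] + "MMSS"[:i] for i in range(4))
-- ===== Notes on version B (the rewrite author's own statement) =====
-- stated objective: alternative
-- what changed: Replaces the helper-based per-coordinate bounds scan, the central-'A' branch, the diagonal-inequality test and the M/S counting with one arithmetic range guard plus a pattern-table match: the centre and the four corners read clockwise must spell 'A' followed by one of the four rotations of 'MMSS'.
-- outside the precondition, e.g. on is_x_shaped_mas_on_coords(['BBB', 'BBB', 'BB'], (1, 1)): A returns False, B raises IndexError
-- crash fix: On an empty grid with a negative row coordinate A raises IndexError (len(map[0])); B returns False. — e.g. on is_x_shaped_mas_on_coords([], (-1, 0)): A raises IndexError, B returns false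
import Mathlib
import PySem

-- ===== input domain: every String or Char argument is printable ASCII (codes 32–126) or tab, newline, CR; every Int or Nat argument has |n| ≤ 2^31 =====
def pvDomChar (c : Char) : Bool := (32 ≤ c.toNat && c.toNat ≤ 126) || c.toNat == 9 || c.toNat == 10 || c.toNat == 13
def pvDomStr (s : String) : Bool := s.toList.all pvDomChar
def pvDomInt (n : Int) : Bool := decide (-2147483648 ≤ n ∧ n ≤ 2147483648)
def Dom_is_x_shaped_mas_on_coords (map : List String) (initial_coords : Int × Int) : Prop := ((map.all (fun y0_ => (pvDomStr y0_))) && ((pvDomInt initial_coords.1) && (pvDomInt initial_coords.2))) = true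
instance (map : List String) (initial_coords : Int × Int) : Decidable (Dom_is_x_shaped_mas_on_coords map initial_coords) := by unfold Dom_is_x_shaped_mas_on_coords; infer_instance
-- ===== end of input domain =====

-- B replaces A's helper-based bounds scan, central-'A' branch, diagonal-inequality test and M/S
-- counting by one arithmetic range guard plus a pattern-table match against the four rotations
-- of "MMSS" (objective: alternative).

-- ===== PORT A =====
-- len(map[0]): in Python this raises IndexError on the empty list; that case is only reached with
-- map = [] and a negative row coordinate, which Pre_ excludes; here it yields 0.
def pvLenRow0 (map : List String) : Int :=
  match map with
  | [] => 0
  | s :: _ => PySem.Str.len s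

-- map[x][y]: some ch when both indexes are in range (Pre_ guarantees that wherever it is read)
def pvCell (map : List String) (x y : Int) : Option Char :=
  (PySem.List.pyGet? map x).bind (fun s => PySem.Str.pyGet? s y)

def is_out_of_bounds (map : List String) (coords : Int × Int) : Bool :=
  decide ((map.length : Int) ≤ coords.1) || decide (pvLenRow0 map ≤ coords.2) ||
  decide (coords.1 < 0) || decide (coords.2 < 0)

def is_x_shaped_mas_on_coords (map : List String) (initial_coords : Int × Int) : Bool :=
  let lower_right_coords := (initial_coords.1 + 1, initial_coords.2 + 1)
  let lower_left_coords := (initial_coords.1 + 1, initial_coords.2 - 1)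
  let upper_left_coords := (initial_coords.1 - 1, initial_coords.2 - 1)
  let upper_right_coords := (initial_coords.1 - 1, initial_coords.2 + 1)
  let x_coords := [lower_right_coords, lower_left_coords, upper_left_coords, upper_right_coords]
  if is_out_of_bounds map initial_coords || (x_coords.map (fun coords => is_out_of_bounds map coords)).any (fun b => b) then
    false
  else if !(pvCell map initial_coords.1 initial_coords.2 == some 'A') then
    false
  else if pvCell map lower_right_coords.1 lower_right_coords.2 == pvCell map upper_left_coords.1 upper_left_coords.2 then
    false
  else
    let letters := x_coords.map (fun p => pvCell map p.1 p.2)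
    decide (letters.count (some 'M') = 2) && decide (letters.count (some 'S') = 2)

-- ===== PORT B =====
-- the Python string ring/"MMSS" is ported as lists of (option) chars; "MMSS"[i:]+"MMSS"[:i]
-- with i ∈ range(4) (so i ≥ 0) is exactly drop/take at i
def is_x_shaped_mas_on_coords_alt (map : List String) (initial_coords : Int × Int) : Bool :=
  let r := initial_coords.1
  let c := initial_coords.2
  let rows : Int := map.length
  let cols : Int := pvLenRow0 map          -- len(map[0]) if map else 0
  if !(decide (1 ≤ r) && decide (r ≤ rows - 2) && decide (1 ≤ c) && decide (c ≤ cols - 2)) then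
    false
  else
    let ring : List (Option Char) :=
      [pvCell map r c, pvCell map (r-1) (c-1), pvCell map (r-1) (c+1),
       pvCell map (r+1) (c+1), pvCell map (r+1) (c-1)]
    let base : List Char := ['M', 'M', 'S', 'S']
    (PySem.List.pyRange 0 4 1).any (fun i =>
      ring == some 'A' :: ((base.drop i.toNat ++ base.take i.toNat).map some))

-- ===== PRECONDITION & SPEC =====
-- Pre_ excludes (a) the empty grid with a negative row coordinate, where A raises IndexError on
-- len(map[0]), and (b) ragged grids whose X position is nominally in bounds (per len(map[0])) but
-- where one of the three touched rows is too short to hold the X, so that A may raise IndexError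
-- depending on the cell contents (on some such inputs A still returns False by short-circuiting
-- at the central-'A' check, where B raises).
def Pre_is_x_shaped_mas_on_coords (map : List String) (initial_coords : Int × Int) : Prop :=
  (map = [] → 0 ≤ initial_coords.1) ∧
  ((1 ≤ initial_coords.1 ∧ initial_coords.1 ≤ (map.length : Int) - 2 ∧
    1 ≤ initial_coords.2 ∧ initial_coords.2 ≤ pvLenRow0 map - 2) →
    (initial_coords.2 + 1 ≤ PySem.Str.len (PySem.List.pyGetD map initial_coords.1 "") ∧
     initial_coords.2 + 2 ≤ PySem.Str.len (PySem.List.pyGetD map (initial_coords.1 - 1) "") ∧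
     initial_coords.2 + 2 ≤ PySem.Str.len (PySem.List.pyGetD map (initial_coords.1 + 1) "")))
instance (map : List String) (initial_coords : Int × Int) : Decidable (Pre_is_x_shaped_mas_on_coords map initial_coords) := by unfold Pre_is_x_shaped_mas_on_coords; infer_instance

def pvWitness_is_x_shaped_mas_on_coords : List String × (Int × Int) :=
  (["MXS", "XAX", "MXS"], (1, 1))

-- On an empty grid with a negative row coordinate A raises IndexError (len(map[0])); B returns False.
def Raises_is_x_shaped_mas_on_coords (map : List String) (initial_coords : Int × Int) : Prop :=
  map = [] ∧ initial_coords.1 < 0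
instance (map : List String) (initial_coords : Int × Int) : Decidable (Raises_is_x_shaped_mas_on_coords map initial_coords) := by unfold Raises_is_x_shaped_mas_on_coords; infer_instance
def pvRaiseWitness_is_x_shaped_mas_on_coords : List String × (Int × Int) := ([], (-1, 0))
def pvRaiseWitnessOut_is_x_shaped_mas_on_coords : Bool := false

def Spec_is_x_shaped_mas_on_coords (map : List String) (initial_coords : Int × Int) (out : Bool) : Prop := out = is_x_shaped_mas_on_coords_alt map initial_coords
instance (map : List String) (initial_coords : Int × Int) (out : Bool) : Decidable (Spec_is_x_shaped_mas_on_coords map initial_coords out) := by unfold Spec_is_x_shaped_mas_on_coords; infer_instance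

-- ===== CLAIM (what is proved, stated in full; the proofs are below) =====
def Claim_equal_is_x_shaped_mas_on_coords : Prop := ∀ (map : List String) (initial_coords : Int × Int), Dom_is_x_shaped_mas_on_coords map initial_coords → Pre_is_x_shaped_mas_on_coords map initial_coords → Spec_is_x_shaped_mas_on_coords map initial_coords (is_x_shaped_mas_on_coords map initial_coords)
def Claim_raises_is_x_shaped_mas_on_coords : Prop := (∀ (map : List String) (initial_coords : Int × Int), Dom_is_x_shaped_mas_on_coords map initial_coords → Raises_is_x_shaped_mas_on_coords map initial_coords → ¬ Pre_is_x_shaped_mas_on_coords map initial_coords) ∧ (Dom_is_x_shaped_mas_on_coords (pvRaiseWitness_is_x_shaped_mas_on_coords.1) (pvRaiseWitness_is_x_shaped_mas_on_coords.2) ∧ Raises_is_x_shaped_mas_on_coords (pvRaiseWitness_is_x_shaped_mas_on_coords.1) (pvRaiseWitness_is_x_shaped_mas_on_coords.2) ∧ is_x_shaped_mas_on_coords_alt (pvRaiseWitness_is_x_shaped_mas_on_coords.1) (pvRaiseWitness_is_x_shaped_mas_on_coords.2) = pvRaiseWitnessOut_is_x_shaped_mas_on_coords)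

-- ===== LEMMAS AND PROOFS =====

-- with an 'A' centre: "two M's and two S's among the corners, main diagonal unequal"
-- = "centre+corners clockwise is 'A' + a rotation of MMSS"
set_option maxHeartbeats 1000000 in
lemma pv_ring_equiv (a b c d : Char) :
    ((if (some a : Option Char) == some c then false
      else decide (([some a, some b, some c, some d] : List (Option Char)).count (some 'M') = 2) &&
           decide (([some a, some b, some c, some d] : List (Option Char)).count (some 'S') = 2)) : Bool)
    = (PySem.List.pyRange 0 4 1).any (fun i =>
        ([some 'A', some c, some d, some a, some b] : List (Option Char)) ==
          some 'A' :: (((['M', 'M', 'S', 'S'] : List Char).drop i.toNat ++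
            (['M', 'M', 'S', 'S'] : List Char).take i.toNat).map some)) := by
  have hr : PySem.List.pyRange 0 4 1 = [0, 1, 2, 3] := by decide
  rw [hr]
  by_cases haM : a = 'M' <;> by_cases haS : a = 'S' <;> by_cases hbM : b = 'M' <;> by_cases hbS : b = 'S' <;>
  by_cases hcM : c = 'M' <;> by_cases hcS : c = 'S' <;> by_cases hdM : d = 'M' <;> by_cases hdS : d = 'S' <;>
    simp_all [List.count_nil]

lemma pv_cell_some (map : List String) (x y : Int) (hx0 : 0 ≤ x) (hx : x < (map.length : Int))
    (hy0 : 0 ≤ y) (hy : y < PySem.Str.len (PySem.List.pyGetD map x "")) :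
    ∃ ch, pvCell map x y = some ch := by
  unfold pvCell
  rw [PySem.List.pyGet?_eq_some_getElem map hx0 hx, Option.bind_some]
  rw [PySem.List.pyGetD_eq_getElem map "" hx0 hx] at hy
  rw [PySem.Str.len_eq] at hy
  have hlt : y.toNat < (map[x.toNat]).toList.length := by omega
  refine ⟨(map[x.toNat]).toList[y.toNat], ?_⟩
  rw [show PySem.Str.pyGet? map[x.toNat] y = PySem.Chars.pyGet? (map[x.toNat]).toList y from rfl]
  rw [PySem.Chars.pyGet?_eq_listPyGet?]
  rw [PySem.List.pyGet?_eq_some_getElem _ hy0 (by omega)]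

-- ===== VERDICT (by name: the statement is the Claim_ definition above) =====
theorem is_x_shaped_mas_on_coords_spec : Claim_equal_is_x_shaped_mas_on_coords := by
  rintro map ⟨r, c⟩ _ ⟨hpre1, hpre2⟩
  dsimp only at hpre1 hpre2
  unfold Spec_is_x_shaped_mas_on_coords
  by_cases hG : 1 ≤ r ∧ r ≤ (map.length : Int) - 2 ∧ 1 ≤ c ∧ c ≤ pvLenRow0 map - 2
  · obtain ⟨hr1, hr2, hc1, hc2⟩ := hG
    obtain ⟨hlr_r, hlr_m, hlr_p⟩ := hpre2 ⟨hr1, hr2, hc1, hc2⟩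
    obtain ⟨e, he⟩ := pv_cell_some map r c (by omega) (by omega) (by omega) (by omega)
    obtain ⟨a, ha⟩ := pv_cell_some map (r+1) (c+1) (by omega) (by omega) (by omega) (by omega)
    obtain ⟨b, hb⟩ := pv_cell_some map (r+1) (c-1) (by omega) (by omega) (by omega) (by omega)
    obtain ⟨cc, hc⟩ := pv_cell_some map (r-1) (c-1) (by omega) (by omega) (by omega) (by omega)
    obtain ⟨d, hd⟩ := pv_cell_some map (r-1) (c+1) (by omega) (by omega) (by omega) (by omega)
    simp only [is_x_shaped_mas_on_coords, is_x_shaped_mas_on_coords_alt,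
      List.map_cons, List.map_nil, List.any_cons, List.any_nil]
    simp only [he, ha, hb, hc, hd]
    have hOA : ¬((is_out_of_bounds map (r, c) || (is_out_of_bounds map (r+1, c+1) ||
        (is_out_of_bounds map (r+1, c-1) || (is_out_of_bounds map (r-1, c-1) ||
        (is_out_of_bounds map (r-1, c+1) || false))))) = true) := by
      simp [is_out_of_bounds]; omega
    have hGB : ¬((!(decide (1 ≤ r) && decide (r ≤ (map.length : Int) - 2) && decide (1 ≤ c) &&
        decide (c ≤ pvLenRow0 map - 2))) = true) := by
      simp; omega
    rw [if_neg hOA, if_neg hGB]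
    by_cases heA : e = 'A'
    · subst heA
      have hcA : ¬((!((some 'A' : Option Char) == some 'A')) = true) := by simp
      rw [if_neg hcA]
      exact pv_ring_equiv a b cc d
    · have hcA : ((!(some e == (some 'A' : Option Char))) = true) := by simp [heA]
      rw [if_pos hcA]
      have hr4 : PySem.List.pyRange 0 4 1 = [0, 1, 2, 3] := by decide
      rw [hr4]
      simp [heA]
  · have hA : is_x_shaped_mas_on_coords map (r, c) = false := by
      simp only [is_x_shaped_mas_on_coords, List.map_cons, List.map_nil, List.any_cons, List.any_nil]
      rw [if_pos (by simp only [is_out_of_bounds, Bool.or_eq_true, decide_eq_true_eq]; omega)]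
    have hB : is_x_shaped_mas_on_coords_alt map (r, c) = false := by
      simp only [is_x_shaped_mas_on_coords_alt]
      rw [if_pos (by simp only [Bool.not_eq_true', Bool.and_eq_false_iff, decide_eq_false_iff_not]; omega)]
    rw [hA, hB]

@[simp]
theorem is_x_shaped_mas_on_coords_raises : Claim_raises_is_x_shaped_mas_on_coords := by
  unfold Claim_raises_is_x_shaped_mas_on_coords
  constructor
  · rintro map ic _ ⟨hm, hr⟩ ⟨h1, _⟩
    have := h1 hm; omega
  · decide
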